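-- pv_equiv track=rewrite | github.com/starkware-libs/formal-proofs | src/starkware/cairo/lean/verification/generate_prelude.py | insert_prelude_blocks
-- ===== SOURCE A (Python) =====
-- from typing import List, Tuple
--
-- def stripped_block(block: List[str]) -> List[str]:
--     """
--     Remove empty lines from the block
--     """
--     return list(filter(lambda x: x != "" and not x.isspace(), block))
--
-- def line_block_at(block: List[str], lines: List[str], pos: int) -> bool:
--     # Compare without (trailing) empty lines.
--     block = stripped_block(block)
--
--     if len(lines) - pos < len(block):
--         return False
--     for i, b_line in enumerate(block):
--         if b_line.strip() != lines[pos + i].strip():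
--             return False
--     return True
--
-- def insert_prelude_blocks_at(
--     prelude: List[List[str]], lines: List[str], from_block: int, to_block: int, insert_pos: int
-- ) -> Tuple[List[str], int]:
--     """
--     Inserts prelude blocks from from_block to to_block (not including) into
--     the list of lines at position insert_pos. Returns the new list and the number of
--     lines added.
--     """
--     if from_block >= to_block:
--         return (lines, 0)
--
--     insert = [line for block in prelude[from_block:to_block] for line in block]
--     return (lines[:insert_pos] + insert + lines[insert_pos:], len(insert))
--
-- def insert_prelude_blocks(prelude: List[List[str]], lines: List[str]) -> List[str]:
--     """
--     Inserts the prelude into a list of lines (of a Lean file). Each block (list of line)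
--     in the prelude is added to the file's list of lines if it does not already appear
--     in the list. The block is added as close to the beginning of the list as possible,
--     but not before the position of the previous prelude block.
--     Returns the new list of lines.
--     """
--     search_pos = 0
--     insert_pos = search_pos
--     block_to_insert = 0
--
--     while search_pos < len(lines) and block_to_insert < len(prelude):
--         for block in range(block_to_insert, len(prelude)):
--             if line_block_at(prelude[block], lines, search_pos):
--                 lines, added = insert_prelude_blocks_at(
--                     prelude, lines, block_to_insert, block, insert_pos
--                 )
--                 search_pos += added + len(stripped_block(prelude[block]))
--                 insert_pos = search_pos
--                 block_to_insert = block + 1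
--                 break
--         else:
--             search_pos += 1
--
--     lines, _ = insert_prelude_blocks_at(prelude, lines, block_to_insert, len(prelude), insert_pos)
--     return lines
-- ===== SOURCE B (Python) =====
-- from typing import List, Tuple
--
--
-- def stripped_block(block: List[str]) -> List[str]:
--     """Remove empty lines from the block."""
--     return [x for x in block if x != "" and not x.isspace()]
--
--
-- def block_matches_at(block: List[str], lines: List[str], pos: int) -> bool:
--     """Does the (stripped) block appear at position pos of lines, comparing stripped lines?"""
--     sb = [b.strip() for b in stripped_block(block)]
--     if len(lines) - pos < len(sb):
--         return False
--     return [l.strip() for l in lines[pos:pos + len(sb)]] == sb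
--
--
-- def build_plan(prelude: List[List[str]], lines: List[str]) -> List[Tuple[int, List[List[str]]]]:
--     """
--     One forward pass over the ORIGINAL lines: a list of (position, blocks) entries,
--     each meaning 'insert these prelude blocks before original line #position'.
--     Positions are nondecreasing; the insertion point is just after the previously
--     matched block (never before it).
--     """
--     plan: List[Tuple[int, List[List[str]]]] = []
--     pos = 0      # scan position in the original lines
--     ins = 0      # position just after the last matched block
--     nxt = 0      # first prelude block not yet placed
--     while pos < len(lines) and nxt < len(prelude):
--         m = next((j for j in range(nxt, len(prelude))
--                   if block_matches_at(prelude[j], lines, pos)), None)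
--         if m is None:
--             pos += 1
--         else:
--             plan.append((ins, prelude[nxt:m]))
--             pos += len(stripped_block(prelude[m]))
--             ins = pos
--             nxt = m + 1
--     plan.append((ins, prelude[nxt:]))
--     return plan
--
--
-- def splice(plan: List[Tuple[int, List[List[str]]]], lines: List[str], idx: int) -> List[str]:
--     """Splice the planned blocks into lines (lines starts at original index idx)."""
--     if not plan:
--         return lines
--     (i, blocks) = plan[0]
--     flat = [line for block in blocks for line in block]
--     return lines[:i - idx] + flat + splice(plan[1:], lines[i - idx:], i)
--
--
-- def insert_prelude_blocks(prelude: List[List[str]], lines: List[str]) -> List[str]: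
--     return splice(build_plan(prelude, lines), lines, 0)
-- ===== Notes on version B (the rewrite author's own statement) =====
-- stated objective: alternative
-- what changed: Instead of repeatedly re-slicing and rebuilding the line list while scanning the list it is mutating, B makes one forward pass over the original lines to build an insertion plan of (position, blocks) entries and then splices all blocks in with a single final pass.
import Mathlib
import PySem

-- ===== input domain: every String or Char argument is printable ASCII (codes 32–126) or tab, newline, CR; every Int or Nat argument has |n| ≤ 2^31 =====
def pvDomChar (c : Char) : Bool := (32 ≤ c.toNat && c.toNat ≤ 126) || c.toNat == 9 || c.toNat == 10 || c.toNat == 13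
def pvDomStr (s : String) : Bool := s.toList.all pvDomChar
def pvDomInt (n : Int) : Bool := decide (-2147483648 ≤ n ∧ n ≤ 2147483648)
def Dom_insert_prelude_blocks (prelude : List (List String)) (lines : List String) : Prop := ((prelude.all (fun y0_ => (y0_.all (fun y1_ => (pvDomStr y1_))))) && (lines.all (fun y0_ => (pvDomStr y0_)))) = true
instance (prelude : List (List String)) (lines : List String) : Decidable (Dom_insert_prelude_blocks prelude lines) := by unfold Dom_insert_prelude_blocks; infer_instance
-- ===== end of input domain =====

-- B replaces A's scan-and-mutate loop (which re-slices and rebuilds the line list at every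
-- insertion while scanning the list it is mutating) by a plan-then-splice decomposition:
-- one forward pass over the ORIGINAL lines builds a list of (position, blocks) insertion
-- entries, and a single final pass splices all blocks in.  Equivalence of the return values.

-- ===== PORT A =====
def stripped_blockA (block : List String) : List String :=
  block.filter (fun x => decide (x ≠ "") && !(PySem.Str.strIsspace x))

-- the 'for i, b_line in enumerate(block): …' loop of line_block_at
def lba_loop (lines : List String) (pos : Nat) : Nat → List String → Bool
  | _, [] => true
  | i, b_line :: rest =>
    if PySem.Str.strip b_line ≠ PySem.Str.strip (lines.getD (pos + i) "") then false
    else lba_loop lines pos (i + 1) rest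

def line_block_at (block : List String) (lines : List String) (pos : Nat) : Bool :=
  let b := stripped_blockA block
  if lines.length - pos < b.length then false
  else lba_loop lines pos 0 b

def insert_prelude_blocks_at (prelude : List (List String)) (lines : List String)
    (from_block to_block insert_pos : Nat) : List String × Nat :=
  if from_block ≥ to_block then (lines, 0)
  else
    let ins := ((prelude.drop from_block).take (to_block - from_block)).flatten
    (lines.take insert_pos ++ ins ++ lines.drop insert_pos, ins.length)

-- the 'for block in range(block_to_insert, len(prelude)): … break / else' of the main loop
def findBlockA (prelude : List (List String)) (lines : List String) (sp : Nat) (b : Nat) :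
    Option Nat :=
  if hb : b < prelude.length then
    if line_block_at (prelude.getD b []) lines sp then some b
    else findBlockA prelude lines sp (b + 1)
  else none
termination_by prelude.length - b
decreasing_by exact Nat.sub_lt_sub_left hb (Nat.lt_succ_self b)

-- needed by A_loop's termination argument
theorem findBlockA_bounds (prelude : List (List String)) (lines : List String) (sp : Nat) :
    ∀ b m, findBlockA prelude lines sp b = some m → b ≤ m ∧ m < prelude.length := by
  intro b m h
  fun_induction findBlockA prelude lines sp b with
  | case1 b hb hmatch =>
    injection h with h2
    exact ⟨Nat.le_of_eq h2, h2 ▸ hb⟩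
  | case2 b hb hmatch ih =>
    exact ⟨Nat.le_of_succ_le (ih h).1, (ih h).2⟩
  | case3 b hb => cases h

def A_loop (prelude : List (List String)) (lines : List String) (sp ip bti : Nat) :
    List String :=
  if h : sp < lines.length ∧ bti < prelude.length then
    match hm : findBlockA prelude lines sp bti with
    | some blk =>
      let r := insert_prelude_blocks_at prelude lines bti blk ip
      A_loop prelude r.1 (sp + r.2 + (stripped_blockA (prelude.getD blk [])).length)
        (sp + r.2 + (stripped_blockA (prelude.getD blk [])).length) (blk + 1)
    | none => A_loop prelude lines (sp + 1) ip bti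
  else (insert_prelude_blocks_at prelude lines bti prelude.length ip).1
termination_by (prelude.length - bti, lines.length - sp)
decreasing_by
  · exact Prod.Lex.left _ _
      (Nat.sub_lt_sub_left h.2 (Nat.lt_succ_of_le (findBlockA_bounds prelude lines sp bti blk hm).1))
  · exact Prod.Lex.right _ (Nat.sub_lt_sub_left h.1 (Nat.lt_succ_self sp))

def insert_prelude_blocks (prelude : List (List String)) (lines : List String) : List String :=
  A_loop prelude lines 0 0 0

-- ===== PORT B =====
def stripped_blockB (block : List String) : List String :=
  block.filter (fun x => decide (x ≠ "") && !(PySem.Str.strIsspace x))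

def block_matches_at (block : List String) (lines : List String) (pos : Nat) : Bool :=
  let sb := (stripped_blockB block).map PySem.Str.strip
  if lines.length - pos < sb.length then false
  else decide (((lines.drop pos).take sb.length).map PySem.Str.strip = sb)

-- the 'next((j for j in range(nxt, len(prelude)) if …), None)'
def findBlockB (prelude : List (List String)) (lines : List String) (pos : Nat) (b : Nat) :
    Option Nat :=
  if hb : b < prelude.length then
    if block_matches_at (prelude.getD b []) lines pos then some b
    else findBlockB prelude lines pos (b + 1)
  else none
termination_by prelude.length - b
decreasing_by exact Nat.sub_lt_sub_left hb (Nat.lt_succ_self b)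

-- needed by build_plan_loop's termination argument
theorem findBlockB_bounds (prelude : List (List String)) (lines : List String) (pos : Nat) :
    ∀ b m, findBlockB prelude lines pos b = some m → b ≤ m ∧ m < prelude.length := by
  intro b m h
  fun_induction findBlockB prelude lines pos b with
  | case1 b hb hmatch =>
    injection h with h2
    exact ⟨Nat.le_of_eq h2, h2 ▸ hb⟩
  | case2 b hb hmatch ih =>
    exact ⟨Nat.le_of_succ_le (ih h).1, (ih h).2⟩
  | case3 b hb => cases h

def build_plan_loop (prelude : List (List String)) (lines : List String)
    (pos ins nxt : Nat) : List (Nat × List (List String)) :=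
  if h : pos < lines.length ∧ nxt < prelude.length then
    match hm : findBlockB prelude lines pos nxt with
    | none => build_plan_loop prelude lines (pos + 1) ins nxt
    | some m =>
      (ins, (prelude.drop nxt).take (m - nxt)) ::
        build_plan_loop prelude lines (pos + (stripped_blockB (prelude.getD m [])).length)
          (pos + (stripped_blockB (prelude.getD m [])).length) (m + 1)
  else [(ins, prelude.drop nxt)]
termination_by (prelude.length - nxt, lines.length - pos)
decreasing_by
  · exact Prod.Lex.right _ (Nat.sub_lt_sub_left h.1 (Nat.lt_succ_self pos))
  · exact Prod.Lex.left _ _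
      (Nat.sub_lt_sub_left h.2 (Nat.lt_succ_of_le (findBlockB_bounds prelude lines pos nxt m hm).1))

def build_plan (prelude : List (List String)) (lines : List String) :
    List (Nat × List (List String)) :=
  build_plan_loop prelude lines 0 0 0

def splice : List (Nat × List (List String)) → List String → Nat → List String
  | [], lines, _ => lines
  | (i, blocks) :: ps, lines, idx =>
    lines.take (i - idx) ++ blocks.flatten ++ splice ps (lines.drop (i - idx)) i

def insert_prelude_blocks_alt (prelude : List (List String)) (lines : List String) :
    List String :=
  splice (build_plan prelude lines) lines 0

-- ===== PRECONDITION & SPEC =====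
def Spec_insert_prelude_blocks (prelude : List (List String)) (lines : List String) (out : List String) : Prop := out = insert_prelude_blocks_alt prelude lines
instance (prelude : List (List String)) (lines : List String) (out : List String) : Decidable (Spec_insert_prelude_blocks prelude lines out) := by unfold Spec_insert_prelude_blocks; infer_instance

-- ===== CLAIM (what is proved, stated in full; the proofs are below) =====
def Claim_equal_insert_prelude_blocks : Prop := ∀ (prelude : List (List String)) (lines : List String), Dom_insert_prelude_blocks prelude lines → Spec_insert_prelude_blocks prelude lines (insert_prelude_blocks prelude lines)

-- ===== LEMMAS AND PROOFS =====

theorem lba_loop_decide (lines : List String) (pos : Nat) :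
    ∀ (bs : List String) (i : Nat), pos + i + bs.length ≤ lines.length →
      lba_loop lines pos i bs
        = decide (((lines.drop (pos + i)).take bs.length).map PySem.Str.strip
            = bs.map PySem.Str.strip) := by
  intro bs
  induction bs with
  | nil => intro i _; simp [lba_loop]
  | cons b rest ih =>
    intro i hlen
    have hlen' : pos + i + 1 + rest.length ≤ lines.length := by
      simp only [List.length_cons] at hlen; omega
    have hidx : pos + i < lines.length := by omega
    have hdrop : lines.drop (pos + i) = lines[pos + i] :: lines.drop (pos + i + 1) :=
      List.drop_eq_getElem_cons hidx
    have hget : lines.getD (pos + i) "" = lines[pos + i] := by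
      simp [List.getD_eq_getElem?_getD, List.getElem?_eq_getElem hidx]
    have ih' := ih (i + 1) (by omega)
    rw [← Nat.add_assoc] at ih'
    simp only [lba_loop, hget, hdrop, List.length_cons, List.take_succ_cons, List.map_cons]
    by_cases hb : PySem.Str.strip b = PySem.Str.strip lines[pos + i]
    · rw [if_neg (not_not_intro hb), ih']
      exact decide_eq_decide.mpr (by simp [hb])
    · rw [if_pos hb]
      symm
      rw [decide_eq_false_iff_not]
      intro hcc
      exact hb (List.cons_eq_cons.mp hcc).1.symm

theorem stripped_eq : stripped_blockA = stripped_blockB := rfl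

theorem lba_eq_bma (block lines : List String) (pos : Nat) :
    line_block_at block lines pos = block_matches_at block lines pos := by
  unfold line_block_at block_matches_at
  rw [← stripped_eq]
  simp only [List.length_map]
  by_cases hc : lines.length - pos < (stripped_blockA block).length
  · simp [hc]
  · simp only [hc, if_false]
    rcases Decidable.em ((stripped_blockA block) = []) with he | he
    · simp [he, lba_loop]
    · have hlen : pos + 0 + (stripped_blockA block).length ≤ lines.length := by
        have : (stripped_blockA block).length ≠ 0 := by simpa using he
        omega
      have := lba_loop_decide lines pos (stripped_blockA block) 0 hlen
      simpa using this

theorem find_shift (prelude : List (List String)) (cur orig : List String) (sp p : Nat)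
    (hlen : cur.length - sp = orig.length - p) (hdrop : cur.drop sp = orig.drop p) :
    ∀ b, findBlockA prelude cur sp b = findBlockB prelude orig p b := by
  have hpt : ∀ blkk, line_block_at blkk cur sp = block_matches_at blkk orig p := by
    intro blkk
    rw [lba_eq_bma]
    simp [block_matches_at, hlen, hdrop]
  intro b
  fun_induction findBlockA prelude cur sp b with
  | case1 b hb hmatch =>
    rw [findBlockB, dif_pos hb, if_pos (by rw [← hpt]; exact hmatch)]
  | case2 b hb hmatch ih =>
    rw [ih]
    conv_rhs => rw [findBlockB]
    rw [dif_pos hb, if_neg (by rw [← hpt]; exact hmatch)]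
  | case3 b hb => rw [findBlockB, dif_neg hb]

theorem ipba_eq (prelude : List (List String)) (lines : List String)
    (fb tb ip : Nat) (h : fb ≤ tb) :
    insert_prelude_blocks_at prelude lines fb tb ip
      = (lines.take ip ++ ((prelude.drop fb).take (tb - fb)).flatten ++ lines.drop ip,
         ((prelude.drop fb).take (tb - fb)).flatten.length) := by
  unfold insert_prelude_blocks_at
  rcases Nat.eq_or_lt_of_le h with he | hlt
  · subst he; simp
  · rw [if_neg (by omega)]

theorem bma_bound (block lines : List String) (pos : Nat)
    (h : block_matches_at block lines pos = true) :
    pos + (stripped_blockB block).length ≤ lines.length ∨ (stripped_blockB block).length = 0 := by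
  simp only [block_matches_at, List.length_map] at h
  by_cases hc : lines.length - pos < (stripped_blockB block).length
  · rw [if_pos hc] at h; simp at h
  · omega

theorem findBlockB_match (prelude : List (List String)) (lines : List String) (pos : Nat) :
    ∀ b m, findBlockB prelude lines pos b = some m →
      block_matches_at (prelude.getD m []) lines pos = true := by
  intro b m h
  fun_induction findBlockB prelude lines pos b with
  | case1 b hb hmatch => simp at h; subst h; exact hmatch
  | case2 b hb hmatch ih => exact ih h
  | case3 b hb => simp [findBlockB, hb] at h

theorem bpl_head_ge (prelude : List (List String)) (orig : List String) :
    ∀ pos ins nxt i bs rest,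
      build_plan_loop prelude orig pos ins nxt = (i, bs) :: rest → ins ≤ i := by
  intro pos ins nxt
  fun_induction build_plan_loop prelude orig pos ins nxt with
  | case1 pos ins nxt h hm ih => exact ih
  | case2 pos ins nxt h m hm ih => intro i bs rest he; cases he; omega
  | case3 pos ins nxt h => intro i bs rest he; cases he; omega

theorem splice_shift :
    ∀ (plan : List (Nat × List (List String))) (L : List String) (idx j : Nat),
      idx ≤ j → (∀ i bs rest, plan = (i, bs) :: rest → j ≤ i) →
      splice plan L idx = L.take (j - idx) ++ splice plan (L.drop (j - idx)) j := by
  intro plan L idx j hij hhd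
  cases plan with
  | nil => simp [splice]
  | cons e ps =>
    obtain ⟨i, bs⟩ := e
    have hji : j ≤ i := hhd i bs ps rfl
    simp only [splice]
    rw [show i - idx = (j - idx) + (i - j) by omega, List.take_add, List.drop_drop,
      show j - idx + (i - j) = i - idx by omega]
    simp

theorem terminal_lemma (prelude : List (List String)) (orig : List String)
    (p ins nxt : Nat) (D : List String)
    (hterm : ¬ (p < orig.length ∧ nxt < prelude.length))
    (hip : ins ≤ p) (hp : p ≤ orig.length) (hn : nxt ≤ prelude.length) :
    A_loop prelude (D ++ orig.drop ins) (D.length + (p - ins)) D.length nxt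
      = D ++ splice (build_plan_loop prelude orig p ins nxt) (orig.drop ins) ins := by
  have hcondA : ¬ (D.length + (p - ins) < (D ++ orig.drop ins).length ∧
      nxt < prelude.length) := by
    simp only [List.length_append, List.length_drop]
    omega
  rw [A_loop, dif_neg hcondA, build_plan_loop, dif_neg hterm]
  rw [ipba_eq prelude (D ++ orig.drop ins) nxt prelude.length D.length hn]
  have htk : (prelude.drop nxt).take (prelude.length - nxt) = prelude.drop nxt := by
    apply List.take_of_length_le; simp
  simp [splice, htk]

theorem main_lemma (prelude : List (List String)) (orig : List String) :
    ∀ (j : Nat), ∀ (i p ins nxt : Nat) (D : List String),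
      prelude.length - nxt ≤ j → orig.length - p ≤ i →
      ins ≤ p → p ≤ orig.length → nxt ≤ prelude.length →
      A_loop prelude (D ++ orig.drop ins) (D.length + (p - ins)) D.length nxt
        = D ++ splice (build_plan_loop prelude orig p ins nxt) (orig.drop ins) ins := by
  intro j
  induction j with
  | zero =>
    intro i p ins nxt D hj hi hip hp hn
    exact terminal_lemma prelude orig p ins nxt D (by omega) hip hp hn
  | succ j ihj =>
    intro i
    induction i with
    | zero =>
      intro p ins nxt D hj hi hip hp hn
      exact terminal_lemma prelude orig p ins nxt D (by omega) hip hp hn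
    | succ i ihi =>
      intro p ins nxt D hj hi hip hp hn
      by_cases hcond : p < orig.length ∧ nxt < prelude.length
      · obtain ⟨hpL, hnL⟩ := hcond
        have hdropcur : (D ++ orig.drop ins).drop (D.length + (p - ins)) = orig.drop p := by
          rw [List.drop_append, List.drop_eq_nil_of_le (by omega), List.nil_append,
            Nat.add_sub_cancel_left, List.drop_drop]
          congr 1; omega
        have hlencur : (D ++ orig.drop ins).length - (D.length + (p - ins))
            = orig.length - p := by
          simp only [List.length_append, List.length_drop]; omega
        have hfind : ∀ b, findBlockA prelude (D ++ orig.drop ins) (D.length + (p - ins)) b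
            = findBlockB prelude orig p b :=
          find_shift prelude (D ++ orig.drop ins) orig (D.length + (p - ins)) p hlencur hdropcur
        rw [A_loop, dif_pos ⟨by simp only [List.length_append, List.length_drop]; omega, hnL⟩,
          build_plan_loop, dif_pos ⟨hpL, hnL⟩]
        split
        · -- A side found some blk
          rename_i blk heqA
          rw [hfind nxt] at heqA
          split
          · -- B side none : contradiction
            rename_i heqB
            rw [heqA] at heqB; cases heqB
          · -- B side some m
            rename_i m heqB
            rw [heqA] at heqB
            injection heqB with hbm'
            subst hbm'
            have hbm := findBlockB_bounds prelude orig p nxt blk heqA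
            have hmatch := findBlockB_match prelude orig p nxt blk heqA
            have hlsb : p + (stripped_blockB (prelude.getD blk [])).length ≤ orig.length :=
              by rcases bma_bound (prelude.getD blk []) orig p hmatch with h | h <;> omega
            rw [ipba_eq prelude (D ++ orig.drop ins) nxt blk D.length hbm.1]
            set g := ((prelude.drop nxt).take (blk - nxt)).flatten with hg
            set lsb := (stripped_blockB (prelude.getD blk [])).length with hlsbdef
            have hlsbA : (stripped_blockA (prelude.getD blk [])).length = lsb := by
              rw [stripped_eq]
            set ins' := p + lsb with hins'
            set D' := D ++ g ++ (orig.drop ins).take (ins' - ins) with hD'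
            have htkD : (D ++ orig.drop ins).take D.length = D := by simp
            have hdrD : (D ++ orig.drop ins).drop D.length = orig.drop ins := by simp
            have hD'len : D'.length = D.length + g.length + (ins' - ins) := by
              simp only [hD', List.length_append, List.length_take, List.length_drop]
              omega
            have hdd : (orig.drop ins).drop (ins' - ins) = orig.drop ins' := by
              rw [List.drop_drop]; congr 1; omega
            have hcur' : D ++ g ++ orig.drop ins = D' ++ orig.drop ins' := by
              rw [hD', List.append_assoc, List.append_assoc, List.append_assoc]
              congr 2
              rw [← hdd, List.take_append_drop]
            simp only [htkD, hdrD]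
            have hspaux : D.length + (p - ins) + g.length
                + (stripped_blockA (prelude.getD blk [])).length = D'.length := by
              rw [hlsbA, hD'len]; omega
            have hihs := ihj orig.length ins' ins' (blk + 1) D' (by omega) (by omega)
              (Nat.le_refl _) (by omega) (by omega)
            rw [Nat.sub_self, Nat.add_zero] at hihs
            rw [hcur', hspaux, hihs]
            have hsplit : splice (build_plan_loop prelude orig ins' ins' (blk + 1))
                (orig.drop ins) ins
                = (orig.drop ins).take (ins' - ins)
                  ++ splice (build_plan_loop prelude orig ins' ins' (blk + 1))
                      (orig.drop ins') ins' := by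
              rw [splice_shift (build_plan_loop prelude orig ins' ins' (blk + 1))
                (orig.drop ins) ins ins' (by omega)
                (fun i2 bs rest he => bpl_head_ge prelude orig ins' ins' (blk + 1) i2 bs rest he),
                hdd]
            simp only [splice, Nat.sub_self, List.take_zero, List.drop_zero, List.nil_append]
            rw [hsplit, hD']
            simp [List.append_assoc, hg]
        · -- A side none
          rename_i heqA
          rw [hfind nxt] at heqA
          split
          · -- B side none
            have hsp1 : D.length + (p - ins) + 1 = D.length + ((p + 1) - ins) := by omega
            rw [hsp1]
            exact ihi (p + 1) ins nxt D hj (by omega) (by omega) (by omega) hn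
          · -- B side some m : contradiction
            rename_i m heqB
            rw [heqA] at heqB; cases heqB
      · exact terminal_lemma prelude orig p ins nxt D hcond hip hp hn

-- ===== VERDICT (by name: the statement is the Claim_ definition above) =====
theorem insert_prelude_blocks_spec : Claim_equal_insert_prelude_blocks := by
  intro prelude lines _
  unfold Spec_insert_prelude_blocks insert_prelude_blocks insert_prelude_blocks_alt build_plan
  have := main_lemma prelude lines prelude.length lines.length 0 0 0 []
    (by omega) (by omega) (Nat.le_refl 0) (Nat.zero_le _) (Nat.zero_le _)
  simpa using this
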